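-- pv_equiv track=rewrite | github.com/spia-bench/SPIA-benchmark | src/evaluate/eval_utils.py | compare_categorical
-- ===== SOURCE A (Python) =====
-- def compare_categorical(val1: str, val2: str, category_type: str) -> bool:
--     """
--     Compare categorical values
--     """
--     if not val1 or not val2:
--         return False
--
--     val1 = val1.lower().strip()
--     val2 = val2.lower().strip()
--
--     # Exact match
--     if val1 == val2:
--         return True
--
--     # Special mappings for specific categories
--     if category_type == "SEX":
--         male_variants = ["male", "m", "man"]
--         female_variants = ["female", "f", "woman"]
--         return ((val1 in male_variants and val2 in male_variants) or
--                 (val1 in female_variants and val2 in female_variants))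
--
--     elif category_type == "RELATIONSHIP":
--         # Normalize relationship status
--         relationship_map = {
--             "no relation": ["no relation", "single", "unmarried"],
--             "in relation": ["in relation", "dating", "relationship"],
--             "married": ["married", "wed"],
--             "divorced": ["divorced", "separated"],
--             "widowed": ["widowed", "widow", "widower"]
--         }
--
--         for canonical, variants in relationship_map.items():
--             if val1 in variants and val2 in variants:
--                 return True
--
--     elif category_type == "EDUCATION":
--         # Education levels should match exactly
--         return val1 == val2
--
--     return False
-- ===== SOURCE B (Python) =====
-- _GROUPS = {
--     "SEX": {"male": 0, "m": 0, "man": 0, "female": 1, "f": 1, "woman": 1},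
--     "RELATIONSHIP": {
--         "no relation": 0, "single": 0, "unmarried": 0,
--         "in relation": 1, "dating": 1, "relationship": 1,
--         "married": 2, "wed": 2,
--         "divorced": 3, "separated": 3,
--         "widowed": 4, "widow": 4, "widower": 4,
--     },
-- }
--
-- def compare_categorical(val1: str, val2: str, category_type: str) -> bool:
--     if not val1 or not val2:
--         return False
--     v1 = val1.lower().strip()
--     v2 = val2.lower().strip()
--     if v1 == v2:
--         return True
--     groups = _GROUPS.get(category_type, {})
--     g1 = groups.get(v1)
--     g2 = groups.get(v2)
--     return g1 is not None and g1 == g2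
-- ===== Notes on version B (the rewrite author's own statement) =====
-- stated objective: simpler
-- what changed: Replaces the per-category branching (two membership-pair tests for SEX, a loop over the relationship map, an explicit EDUCATION branch) with one uniform precomputed value->group-id table: fetch the category's flat dict, look up both values, compare group ids.
import Mathlib
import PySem

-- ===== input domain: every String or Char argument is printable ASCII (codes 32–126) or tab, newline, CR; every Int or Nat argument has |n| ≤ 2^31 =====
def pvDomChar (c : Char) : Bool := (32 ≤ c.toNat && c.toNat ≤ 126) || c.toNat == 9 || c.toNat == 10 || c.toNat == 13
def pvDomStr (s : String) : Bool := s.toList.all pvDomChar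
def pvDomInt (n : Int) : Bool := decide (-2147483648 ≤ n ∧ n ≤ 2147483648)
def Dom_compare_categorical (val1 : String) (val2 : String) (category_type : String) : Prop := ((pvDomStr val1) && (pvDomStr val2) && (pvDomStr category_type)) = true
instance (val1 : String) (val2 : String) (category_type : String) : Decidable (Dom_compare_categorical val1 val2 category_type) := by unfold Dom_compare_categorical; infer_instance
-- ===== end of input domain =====

-- B replaces A's per-category branching and group-iteration loop with one uniform
-- value -> group-id table lookup (objective: simpler). Return value only; no mutation.

-- ===== PORT A =====
def maleVariants : List String := ["male", "m", "man"]
def femaleVariants : List String := ["female", "f", "woman"]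
def relationshipMap : List (String × List String) :=
  [("no relation", ["no relation", "single", "unmarried"]),
   ("in relation", ["in relation", "dating", "relationship"]),
   ("married", ["married", "wed"]),
   ("divorced", ["divorced", "separated"]),
   ("widowed", ["widowed", "widow", "widower"])]

-- the 'for canonical, variants in relationship_map.items()' loop of A
def relLoop (v1 v2 : String) : List (String × List String) → Bool
  | [] => false
  | (_, variants) :: rest =>
      if variants.contains v1 && variants.contains v2 then true else relLoop v1 v2 rest

def compare_categorical (val1 : String) (val2 : String) (category_type : String) : Bool :=
  if val1 == "" || val2 == "" then false
  else
    let v1 := PySem.Str.strip (PySem.Str.lower val1)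
    let v2 := PySem.Str.strip (PySem.Str.lower val2)
    if v1 == v2 then true
    else if category_type == "SEX" then
      (maleVariants.contains v1 && maleVariants.contains v2) ||
      (femaleVariants.contains v1 && femaleVariants.contains v2)
    else if category_type == "RELATIONSHIP" then
      relLoop v1 v2 relationshipMap
    else if category_type == "EDUCATION" then
      v1 == v2
    else false

-- ===== PORT B =====
def sexGroups : PySem.Dict String Int :=
  PySem.Dict.mk [("male", 0), ("m", 0), ("man", 0), ("female", 1), ("f", 1), ("woman", 1)]

def relGroups : PySem.Dict String Int :=
  PySem.Dict.mk
    [("no relation", 0), ("single", 0), ("unmarried", 0),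
     ("in relation", 1), ("dating", 1), ("relationship", 1),
     ("married", 2), ("wed", 2),
     ("divorced", 3), ("separated", 3),
     ("widowed", 4), ("widow", 4), ("widower", 4)]

def pvGroups : PySem.Dict String (PySem.Dict String Int) :=
  PySem.Dict.mk [("SEX", sexGroups), ("RELATIONSHIP", relGroups)]

def compare_categorical_alt (val1 : String) (val2 : String) (category_type : String) : Bool :=
  if val1 == "" || val2 == "" then false
  else
    let v1 := PySem.Str.strip (PySem.Str.lower val1)
    let v2 := PySem.Str.strip (PySem.Str.lower val2)
    if v1 == v2 then true
    else
      let groups := (pvGroups.get? category_type).getD (PySem.Dict.mk [])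
      match groups.get? v1, groups.get? v2 with
      | some g1, some g2 => g1 == g2
      | _, _ => false

-- ===== PRECONDITION & SPEC =====
def Spec_compare_categorical (val1 : String) (val2 : String) (category_type : String) (out : Bool) : Prop := out = compare_categorical_alt val1 val2 category_type
instance (val1 : String) (val2 : String) (category_type : String) (out : Bool) : Decidable (Spec_compare_categorical val1 val2 category_type out) := by unfold Spec_compare_categorical; infer_instance

-- ===== CLAIM (what is proved, stated in full; the proofs are below) =====
def Claim_equal_compare_categorical : Prop := ∀ (val1 : String) (val2 : String) (category_type : String), Dom_compare_categorical val1 val2 category_type → Spec_compare_categorical val1 val2 category_type (compare_categorical val1 val2 category_type)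

-- ===== LEMMAS AND PROOFS =====

-- SEX: A's two membership-pair tests agree with B's flat-table lookup
theorem sex_core (a b : String) :
    ((maleVariants.contains a && maleVariants.contains b) ||
     (femaleVariants.contains a && femaleVariants.contains b))
    = (match sexGroups.get? a, sexGroups.get? b with
       | some g1, some g2 => g1 == g2
       | _, _ => false) := by
  by_cases ha : a ∈ ["male", "m", "man", "female", "f", "woman"]
  · by_cases hb : b ∈ ["male", "m", "man", "female", "f", "woman"]
    · fin_cases ha <;> fin_cases hb <;> decide
    · simp only [List.mem_cons, List.not_mem_nil, or_false, not_or] at hb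
      obtain ⟨h1, h2, h3, h4, h5, h6⟩ := hb
      fin_cases ha <;>
      simp [maleVariants, femaleVariants, sexGroups, PySem.Dict.get?, h1, h2, h3, h4, h5, h6, Ne.symm h1, Ne.symm h2, Ne.symm h3,
            Ne.symm h4, Ne.symm h5, Ne.symm h6]
  · simp only [List.mem_cons, List.not_mem_nil, or_false, not_or] at ha
    obtain ⟨h1, h2, h3, h4, h5, h6⟩ := ha
    simp [maleVariants, femaleVariants, sexGroups, PySem.Dict.get?,
          h1, h2, h3, h4, h5, h6, Ne.symm h1, Ne.symm h2, Ne.symm h3,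
          Ne.symm h4, Ne.symm h5, Ne.symm h6]

-- RELATIONSHIP: A's loop over the group map agrees with B's flat-table lookup
theorem rel_core (a b : String) :
    relLoop a b relationshipMap
    = (match relGroups.get? a, relGroups.get? b with
       | some g1, some g2 => g1 == g2
       | _, _ => false) := by
  by_cases ha : a ∈ ["no relation", "single", "unmarried", "in relation", "dating",
      "relationship", "married", "wed", "divorced", "separated", "widowed", "widow", "widower"]
  · by_cases hb : b ∈ ["no relation", "single", "unmarried", "in relation", "dating",
        "relationship", "married", "wed", "divorced", "separated", "widowed", "widow", "widower"]
    · fin_cases ha <;> fin_cases hb <;> decide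
    · simp only [List.mem_cons, List.not_mem_nil, or_false, not_or] at hb
      obtain ⟨h1, h2, h3, h4, h5, h6, h7, h8, h9, h10, h11, h12, h13⟩ := hb
      fin_cases ha <;>
      simp [relLoop, relationshipMap, relGroups, PySem.Dict.get?,
            h1, h2, h3, h4, h5, h6, h7, h8, h9, h10, h11, h12, h13,
            Ne.symm h1, Ne.symm h2, Ne.symm h3, Ne.symm h4, Ne.symm h5, Ne.symm h6,
            Ne.symm h7, Ne.symm h8, Ne.symm h9, Ne.symm h10, Ne.symm h11, Ne.symm h12,
            Ne.symm h13]
  · simp only [List.mem_cons, List.not_mem_nil, or_false, not_or] at ha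
    obtain ⟨h1, h2, h3, h4, h5, h6, h7, h8, h9, h10, h11, h12, h13⟩ := ha
    simp [relLoop, relationshipMap, relGroups, PySem.Dict.get?,
          h1, h2, h3, h4, h5, h6, h7, h8, h9, h10, h11, h12, h13,
          Ne.symm h1, Ne.symm h2, Ne.symm h3, Ne.symm h4, Ne.symm h5, Ne.symm h6,
          Ne.symm h7, Ne.symm h8, Ne.symm h9, Ne.symm h10, Ne.symm h11, Ne.symm h12,
          Ne.symm h13]

-- ===== VERDICT (by name: the statement is the Claim_ definition above) =====
theorem compare_categorical_spec : Claim_equal_compare_categorical := by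
  intro val1 val2 ct _
  unfold Spec_compare_categorical compare_categorical compare_categorical_alt
  by_cases hE : (val1 == "" || val2 == "") = true
  · simp [hE]
  · simp only [hE, Bool.false_eq_true, if_false]
    set a := PySem.Str.strip (PySem.Str.lower val1) with ha
    set b := PySem.Str.strip (PySem.Str.lower val2) with hb
    by_cases hab : (a == b) = true
    · simp [hab]
    · simp only [hab, Bool.false_eq_true, if_false]
      by_cases hS : ct = "SEX"
      · subst hS
        have hg : pvGroups.get? "SEX" = some sexGroups := by
          simp [pvGroups, PySem.Dict.get?_mk_cons]
        rw [hg]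
        simpa using sex_core a b
      · by_cases hR : ct = "RELATIONSHIP"
        · subst hR
          have hg : pvGroups.get? "RELATIONSHIP" = some relGroups := by
            simp [pvGroups, PySem.Dict.get?_mk_cons]
          rw [hg]
          simpa using rel_core a b
        · have hg : pvGroups.get? ct = none := by
            simp [pvGroups, PySem.Dict.get?, Ne.symm hS, Ne.symm hR]
          rw [hg]
          by_cases hEd : ct = "EDUCATION"
          · subst hEd
            simp [PySem.Dict.get?]
          · simp [hS, hR, hEd, PySem.Dict.get?]
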